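-- pv_equiv track=rewrite | github.com/4Rom1/crypto-bot | utilities.py | MaxDiffWindow
-- ===== SOURCE A (Python) =====
-- def MaxDiffWindow(arr, k):
--
--     maxdiff = 0
--
--     for i in range(len(arr) - k + 1):
--         local_max = arr[i]
--         local_min = arr[i]
--         for j in range(1, k):
--             if arr[i + j] > local_max:
--                 local_max = arr[i + j]
--             if arr[i + j] < local_min:
--                 local_min = arr[i + j]
--
--         maxdiff = max(maxdiff, local_max-local_min)
--
--     return maxdiff
-- ===== SOURCE B (Python) =====
-- def MaxDiffWindow(arr, k):
--     # Sliding-window max/min via per-block prefix/suffix extrema: O(n) instead of O(n*k).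
--     n = len(arr)
--     pmax = []
--     pmin = []
--     for i in range(n):
--         x = arr[i]
--         if i % k == 0:
--             pmax.append(x)
--             pmin.append(x)
--         else:
--             pmax.append(max(pmax[-1], x))
--             pmin.append(min(pmin[-1], x))
--     rsmax = []
--     rsmin = []
--     for i in range(n - 1, -1, -1):
--         x = arr[i]
--         if i == n - 1 or (i + 1) % k == 0:
--             rsmax.append(x)
--             rsmin.append(x)
--         else:
--             rsmax.append(max(rsmax[-1], x))
--             rsmin.append(min(rsmin[-1], x))
--     smax = list(reversed(rsmax))
--     smin = list(reversed(rsmin))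
--     best = 0
--     for i in range(n - k + 1):
--         w = max(smax[i], pmax[i + k - 1]) - min(smin[i], pmin[i + k - 1])
--         if w > best:
--             best = w
--     return best
-- ===== Notes on version B (the rewrite author's own statement) =====
-- stated objective: faster
-- what changed: Replaces A's rescan of every length-k window with one O(n) pass building per-block prefix and suffix running max/min arrays, so each window's max/min is the combination of two precomputed values.
import Mathlib
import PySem

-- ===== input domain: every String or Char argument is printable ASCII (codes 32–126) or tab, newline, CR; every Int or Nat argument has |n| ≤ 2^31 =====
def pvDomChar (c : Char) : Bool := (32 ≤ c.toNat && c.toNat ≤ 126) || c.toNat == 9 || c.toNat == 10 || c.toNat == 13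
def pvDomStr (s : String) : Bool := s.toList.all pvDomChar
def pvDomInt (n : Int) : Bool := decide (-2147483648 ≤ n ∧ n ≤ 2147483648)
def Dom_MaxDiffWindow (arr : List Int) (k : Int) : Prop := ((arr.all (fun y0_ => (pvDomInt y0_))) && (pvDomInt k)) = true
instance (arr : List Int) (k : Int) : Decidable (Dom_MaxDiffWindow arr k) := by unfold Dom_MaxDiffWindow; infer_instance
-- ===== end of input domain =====

-- B replaces A's O(n*k) rescan of every length-k window with an O(n) per-block
-- prefix/suffix running max/min pass (objective: faster).


-- ===== PORT A =====
def MaxDiffWindow (arr : List Int) (k : Int) : Int :=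
  (PySem.List.pyRange 0 ((arr.length : Int) - k + 1) 1).foldl (fun maxdiff i =>
    let p := (PySem.List.pyRange 1 k 1).foldl (fun (p : Int × Int) j =>
        let a := PySem.List.pyGetD arr (i + j) 0
        (if a > p.1 then a else p.1, if a < p.2 then a else p.2))
      (PySem.List.pyGetD arr i 0, PySem.List.pyGetD arr i 0)
    max maxdiff (p.1 - p.2)) 0

-- ===== PORT B =====
-- body of B's first loop: per-block prefix running max/min, pair state (pmax, pmin)
def pvPStep (k : Int) (arr : List Int) (st : List Int × List Int) (i : Int) : List Int × List Int :=
  let x := PySem.List.pyGetD arr i 0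
  if PySem.Int.mod i k = 0 then (st.1 ++ [x], st.2 ++ [x])
  else (st.1 ++ [max (PySem.List.pyGetD st.1 (-1) 0) x],
        st.2 ++ [min (PySem.List.pyGetD st.2 (-1) 0) x])

-- body of B's second (descending) loop: per-block suffix running max/min, built reversed
def pvSStep (n k : Int) (arr : List Int) (st : List Int × List Int) (i : Int) : List Int × List Int :=
  let x := PySem.List.pyGetD arr i 0
  if i = n - 1 ∨ PySem.Int.mod (i + 1) k = 0 then (st.1 ++ [x], st.2 ++ [x])
  else (st.1 ++ [max (PySem.List.pyGetD st.1 (-1) 0) x],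
        st.2 ++ [min (PySem.List.pyGetD st.2 (-1) 0) x])

def MaxDiffWindow_alt (arr : List Int) (k : Int) : Int :=
  let n : Int := arr.length
  let p := (PySem.List.pyRange 0 n 1).foldl (pvPStep k arr) ([], [])
  let r := (PySem.List.pyRange (n - 1) (-1) (-1)).foldl (pvSStep n k arr) ([], [])
  let smax := r.1.reverse
  let smin := r.2.reverse
  (PySem.List.pyRange 0 (n - k + 1) 1).foldl (fun best i =>
    let w := max (PySem.List.pyGetD smax i 0) (PySem.List.pyGetD p.1 (i + k - 1) 0)
           - min (PySem.List.pyGetD smin i 0) (PySem.List.pyGetD p.2 (i + k - 1) 0)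
    if w > best then w else best) 0

-- ===== PRECONDITION & SPEC =====
-- A raises IndexError whenever k ≤ 0 (its window loop then reads past the end of arr);
-- Pre_ excludes exactly those inputs. For every k ≥ 1 A returns normally.
def Pre_MaxDiffWindow (arr : List Int) (k : Int) : Prop := 1 ≤ k
instance (arr : List Int) (k : Int) : Decidable (Pre_MaxDiffWindow arr k) := by unfold Pre_MaxDiffWindow; infer_instance
def pvWitness_MaxDiffWindow : List Int × Int := ([1, 5, 2, 9, 3], 3)

def Spec_MaxDiffWindow (arr : List Int) (k : Int) (out : Int) : Prop := out = MaxDiffWindow_alt arr k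
instance (arr : List Int) (k : Int) (out : Int) : Decidable (Spec_MaxDiffWindow arr k out) := by unfold Spec_MaxDiffWindow; infer_instance

-- ===== CLAIM (what is proved, stated in full; the proofs are below) =====
def Claim_equal_MaxDiffWindow : Prop := ∀ (arr : List Int) (k : Int), Dom_MaxDiffWindow arr k → Pre_MaxDiffWindow arr k → Spec_MaxDiffWindow arr k (MaxDiffWindow arr k)

-- ===== LEMMAS AND PROOFS =====

-- fold of f over the window arr[i], arr[i+1], …, arr[i+l] (seed arr[i], l further elements)
def wF (f : Int → Int → Int) (arr : List Int) (i l : Nat) : Int :=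
  (List.range l).foldl (fun a t => f a (arr.getD (i + 1 + t) 0)) (arr.getD i 0)

-- value of B's prefix array at index j: fold over arr[j - j%K … j]
def pS (f : Int → Int → Int) (arr : List Int) (K j : Nat) : Int :=
  wF f arr (j - j % K) (j % K)

-- value of B's suffix array at index i: fold over arr[i … end of i's block (clamped)]
def sS (f : Int → Int → Int) (arr : List Int) (K i : Nat) : Int :=
  wF f arr i (min (K - 1 - i % K) (arr.length - 1 - i))

-- the common shape both programs compute: fold of window ranges over all window starts
def specLoop (arr : List Int) (K : Nat) : Int :=
  (List.range (arr.length + 1 - K)).foldl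
    (fun m i => max m (wF max arr i (K - 1) - wF min arr i (K - 1))) 0

theorem if_gt_eq_max (m x : Int) : (if x > m then x else m) = max m x := by
  rw [max_def]; split_ifs <;> omega

theorem if_lt_eq_min (m x : Int) : (if x < m then x else m) = min m x := by
  rw [min_def]; split_ifs <;> omega

theorem wF_zero (f : Int → Int → Int) (arr : List Int) (i : Nat) :
    wF f arr i 0 = arr.getD i 0 := rfl

theorem wF_succ (f : Int → Int → Int) (arr : List Int) (i l : Nat) :
    wF f arr i (l + 1) = f (wF f arr i l) (arr.getD (i + 1 + l) 0) := by
  simp [wF, List.range_succ]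

theorem wF_eq_foldl (f : Int → Int → Int) (arr : List Int) (i l : Nat) :
    wF f arr i l = ((List.range l).map (fun t => arr.getD (i + 1 + t) 0)).foldl f (arr.getD i 0) := by
  simp [wF, List.foldl_map]

-- extending a window by one element at the FRONT (needs f commutative and associative)
theorem wF_cons (f : Int → Int → Int) (hc : ∀ a b, f a b = f b a)
    (ha : ∀ a b c, f (f a b) c = f a (f b c)) (arr : List Int) (i l : Nat) :
    f (wF f arr (i + 1) l) (arr.getD i 0) = wF f arr i (l + 1) := by
  rw [hc, wF_eq_foldl, wF_eq_foldl, List.range_succ_eq_map]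
  simp only [List.map_cons, List.map_map, List.foldl_cons]
  rw [@List.foldl_assoc _ f ⟨ha⟩]
  congr 2
  · apply List.map_congr_left
    intro t _
    simp only [Function.comp_apply, Nat.succ_eq_add_one]
    have h : i + 1 + 1 + t = i + 1 + (t + 1) := by omega
    rw [h]

-- splitting a window into two adjacent pieces
theorem wF_combine (f : Int → Int → Int) (ha : ∀ a b c, f (f a b) c = f a (f b c))
    (arr : List Int) (i a b : Nat) :
    wF f arr i (a + b + 1) = f (wF f arr i a) (wF f arr (i + a + 1) b) := by
  induction b with
  | zero =>
      rw [show a + 0 + 1 = a + 1 from rfl, wF_succ, wF_zero]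
      congr 2
      omega
  | succ b ih =>
      rw [show a + (b + 1) + 1 = (a + b + 1) + 1 from rfl, wF_succ, ih, ha, wF_succ]
      congr 3
      omega

theorem mod_pred {m K r : Nat} (h : m % K = r) (hr : 1 ≤ r) : (m - 1) % K = r - 1 := by
  rcases Nat.eq_zero_or_pos K with hK | hK
  · subst hK; simp at h ⊢; omega
  · have hd := Nat.div_add_mod m K
    have hrK : r < K := h ▸ Nat.mod_lt _ hK
    have : m - 1 = K * (m / K) + (r - 1) := by omega
    rw [this, Nat.mul_add_mod, Nat.mod_eq_of_lt (by omega)]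

theorem mod_succ (K i : Nat) (hK : 1 ≤ K) :
    (i + 1) % K = if i % K = K - 1 then 0 else i % K + 1 := by
  have hd := Nat.div_add_mod i K
  have hrK : i % K < K := Nat.mod_lt _ hK
  split_ifs with h
  · have h2 : K * (i / K + 1) = K * (i / K) + K := by ring
    have : i + 1 = K * (i / K + 1) := by omega
    rw [this, Nat.mul_mod_right]
  · have : i + 1 = K * (i / K) + (i % K + 1) := by omega
    rw [this, Nat.mul_add_mod, Nat.mod_eq_of_lt (by omega)]

theorem mod_add_pred (K t : Nat) (hK : 1 ≤ K) :
    (t + K - 1) % K = if t % K = 0 then K - 1 else t % K - 1 := by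
  have hd := Nat.div_add_mod t K
  have hrK : t % K < K := Nat.mod_lt _ hK
  split_ifs with h
  · have : t + K - 1 = K * (t / K) + (K - 1) := by omega
    rw [this, Nat.mul_add_mod, Nat.mod_eq_of_lt (by omega)]
  · have h2 : K * (t / K + 1) = K * (t / K) + K := by ring
    have : t + K - 1 = K * (t / K + 1) + (t % K - 1) := by omega
    rw [this, Nat.mul_add_mod, Nat.mod_eq_of_lt (by omega)]

-- one step of B's prefix arrays, inside a block
theorem pS_step (f : Int → Int → Int) (arr : List Int) (K m : Nat) (hr : m % K ≠ 0) :
    pS f arr K m = f (pS f arr K (m - 1)) (arr.getD m 0) := by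
  have hle : m % K ≤ m := Nat.mod_le m K
  have hm1 : (m - 1) % K = m % K - 1 := mod_pred rfl (by omega)
  unfold pS
  rw [hm1]
  obtain ⟨s, hs⟩ : ∃ s, m % K = s + 1 := ⟨m % K - 1, by omega⟩
  rw [hs]
  have h2 : m - 1 - (s + 1 - 1) = m - (s + 1) := by omega
  rw [h2]
  simp only [Nat.add_sub_cancel]
  rw [wF_succ]
  have h3 : m - (s + 1) + 1 + s = m := by omega
  rw [h3]

-- one step of B's suffix arrays, inside a block
theorem sS_step (f : Int → Int → Int) (hc : ∀ a b, f a b = f b a)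
    (ha : ∀ a b c, f (f a b) c = f a (f b c)) (arr : List Int) (K i : Nat) (hK : 1 ≤ K)
    (h1 : i + 1 < arr.length) (h2 : (i + 1) % K ≠ 0) :
    f (sS f arr K (i + 1)) (arr.getD i 0) = sS f arr K i := by
  have hmlt : i % K < K := Nat.mod_lt _ hK
  have hms := mod_succ K i hK
  have hne : i % K ≠ K - 1 := by
    intro h; rw [h] at hms; simp at hms; exact h2 (by omega)
  rw [if_neg hne] at hms
  have hlen : min (K - 1 - i % K) (arr.length - 1 - i)
      = min (K - 1 - (i + 1) % K) (arr.length - 1 - (i + 1)) + 1 := by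
    rw [hms]; omega
  unfold sS
  rw [hlen]
  exact wF_cons f hc ha arr i _

theorem sS_base (f : Int → Int → Int) (arr : List Int) (K i : Nat) (hK : 1 ≤ K)
    (h : i + 1 = arr.length ∨ (i + 1) % K = 0) :
    sS f arr K i = arr.getD i 0 := by
  have hlen : min (K - 1 - i % K) (arr.length - 1 - i) = 0 := by
    rcases h with h | h
    · omega
    · have hms := mod_succ K i hK
      have hmlt : i % K < K := Nat.mod_lt _ hK
      rw [h] at hms
      by_cases hne : i % K = K - 1
      · omega
      · rw [if_neg hne] at hms; omega
  unfold sS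
  rw [hlen, wF_zero]

-- B's first loop builds exactly the per-block prefix extrema arrays
theorem buildP (arr : List Int) (K : Nat) (m : Nat) :
    (List.range m).foldl (fun st (t : Nat) => pvPStep (K : Int) arr st (0 + (t : Int))) ([], []) =
      ((List.range m).map (pS max arr K), (List.range m).map (pS min arr K)) := by
  induction m with
  | zero => simp
  | succ m ih =>
      rw [List.range_succ, List.foldl_append, ih]
      simp only [List.foldl_cons, List.foldl_nil, List.map_append, List.map_cons, List.map_nil]
      unfold pvPStep
      simp only [zero_add, PySem.List.pyGetD_natCast, PySem.Int.mod_natCast, Nat.cast_eq_zero]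
      by_cases h : m % K = 0
      · rw [if_pos h]
        have hp : ∀ g : Int → Int → Int, pS g arr K m = arr.getD m 0 := by
          intro g; unfold pS; rw [h]; rfl
        rw [hp, hp]
      · rw [if_neg h]
        have hm : 1 ≤ m := by
          rcases Nat.eq_zero_or_pos m with h0 | h0
          · exact absurd (h0 ▸ Nat.zero_mod K) h
          · exact h0
        obtain ⟨m', rfl⟩ : ∃ m', m = m' + 1 := ⟨m - 1, by omega⟩
        rw [List.range_succ]
        simp only [List.map_append, List.map_cons, List.map_nil,
          PySem.List.pyGetD_neg_one_append_singleton]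
        rw [pS_step max arr K (m' + 1) h, pS_step min arr K (m' + 1) h]
        simp

-- B's second loop builds exactly the per-block suffix extrema arrays (in reverse)
theorem buildS (arr : List Int) (K : Nat) (hK : 1 ≤ K) (m : Nat) (hm : m ≤ arr.length) :
    (List.range m).foldl
        (fun st (t : Nat) =>
          pvSStep (arr.length : Int) (K : Int) arr st ((arr.length : Int) - 1 - (t : Int))) ([], []) =
      ((List.range m).map (fun t => sS max arr K (arr.length - 1 - t)),
       (List.range m).map (fun t => sS min arr K (arr.length - 1 - t))) := by
  induction m with
  | zero => simp
  | succ m ih =>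
      have hmn : m < arr.length := hm
      rw [List.range_succ, List.foldl_append, ih (by omega)]
      simp only [List.foldl_cons, List.foldl_nil, List.map_append, List.map_cons, List.map_nil]
      unfold pvSStep
      have hidx : (arr.length : Int) - 1 - (m : Int) = ((arr.length - 1 - m : Nat) : Int) := by
        omega
      rw [hidx]
      have hidx1 : ((arr.length - 1 - m : Nat) : Int) + 1 = ((arr.length - m : Nat) : Int) := by
        omega
      rw [hidx1]
      simp only [PySem.List.pyGetD_natCast, PySem.Int.mod_natCast, Nat.cast_eq_zero]
      have hcond : (((arr.length - 1 - m : Nat) : Int) = (arr.length : Int) - 1)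
          ↔ m = 0 := by omega
      by_cases h : m = 0 ∨ (arr.length - m) % K = 0
      · rw [if_pos (by rw [hcond]; exact h)]
        have hbase : (arr.length - 1 - m) + 1 = arr.length ∨ ((arr.length - 1 - m) + 1) % K = 0 := by
          have e : arr.length - 1 - m + 1 = arr.length - m := by omega
          rcases h with h | h
          · left; omega
          · right; rw [e]; exact h
        rw [sS_base max arr K _ hK hbase, sS_base min arr K _ hK hbase]
      · rw [if_neg (by rw [hcond]; exact h)]
        have hm1 : 1 ≤ m := by
          rcases Nat.eq_zero_or_pos m with h0 | h0
          · exact absurd (Or.inl h0) h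
          · exact h0
        obtain ⟨m', rfl⟩ : ∃ m', m = m' + 1 := ⟨m - 1, by omega⟩
        have hmod : (arr.length - 1 - (m' + 1) + 1) % K ≠ 0 := by
          have e : arr.length - 1 - (m' + 1) + 1 = arr.length - (m' + 1) := by omega
          rw [e]
          intro hc
          exact h (Or.inr hc)
        have hlt : (arr.length - 1 - (m' + 1)) + 1 < arr.length := by omega
        rw [List.range_succ]
        simp only [List.map_append, List.map_cons, List.map_nil,
          PySem.List.pyGetD_neg_one_append_singleton]
        have hprev : arr.length - 1 - m' = (arr.length - 1 - (m' + 1)) + 1 := by omega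
        rw [hprev]
        rw [sS_step max max_comm max_assoc arr K (arr.length - 1 - (m' + 1)) hK hlt hmod,
          sS_step min min_comm min_assoc arr K (arr.length - 1 - (m' + 1)) hK hlt hmod]

theorem rev_map_range (g : Nat → Int) (n : Nat) :
    ((List.range n).map (fun t => g (n - 1 - t))).reverse = (List.range n).map g := by
  apply List.ext_getElem
  · simp
  · intro j h1 h2
    simp only [List.length_reverse, List.length_map, List.length_range] at h1 h2
    simp only [List.getElem_reverse, List.getElem_map, List.getElem_range,
      List.length_map, List.length_range]
    congr 1
    omega

-- A's inner rescan of a window computes the same pair of extrema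
theorem innerA (arr : List Int) (i l : Nat) :
    (List.range l).foldl
        (fun (p : Int × Int) t => (max p.1 (arr.getD (i + 1 + t) 0), min p.2 (arr.getD (i + 1 + t) 0)))
        (arr.getD i 0, arr.getD i 0) = (wF max arr i l, wF min arr i l) := by
  induction l with
  | zero => rfl
  | succ l ih => rw [List.range_succ, List.foldl_append, ih]; simp [wF_succ]

-- combining B's suffix value at the window start with its prefix value at the window
-- end yields the window extremum
theorem windowEq (f : Int → Int → Int)
    (ha : ∀ a b c, f (f a b) c = f a (f b c)) (hid : ∀ a, f a a = a)
    (arr : List Int) (K t : Nat) (hK : 1 ≤ K) (ht : t + K ≤ arr.length) :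
    f (sS f arr K t) (pS f arr K (t + K - 1)) = wF f arr t (K - 1) := by
  have hmlt : t % K < K := Nat.mod_lt _ hK
  have hmle : t % K ≤ t := Nat.mod_le t K
  have hmm := mod_add_pred K t hK
  by_cases h : t % K = 0
  · rw [if_pos h] at hmm
    have hsS : sS f arr K t = wF f arr t (K - 1) := by
      unfold sS
      congr 1
      omega
    have hpS : pS f arr K (t + K - 1) = wF f arr t (K - 1) := by
      unfold pS
      rw [hmm]
      congr 1
      omega
    rw [hsS, hpS, hid]
  · rw [if_neg h] at hmm
    have hsS : sS f arr K t = wF f arr t (K - 1 - t % K) := by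
      unfold sS
      congr 1
      omega
    have hpS : pS f arr K (t + K - 1) = wF f arr (t + (K - 1 - t % K) + 1) (t % K - 1) := by
      unfold pS
      rw [hmm]
      congr 1
      omega
    rw [hsS, hpS, ← wF_combine f ha]
    congr 1
    omega

theorem A_eq (arr : List Int) (K : Nat) : MaxDiffWindow arr (K : Int) = specLoop arr K := by
  unfold MaxDiffWindow specLoop
  rw [PySem.List.pyRange_one 0 ((arr.length : Int) - (K : Int) + 1), List.foldl_map]
  have hout : ((arr.length : Int) - (K : Int) + 1 - 0).toNat = arr.length + 1 - K := by omega
  rw [hout]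
  apply PySem.List.foldl_congr_mem
  intro acc t _
  rw [PySem.List.pyRange_one 1 (K : Int), List.foldl_map]
  have hin : ((K : Int) - 1).toNat = K - 1 := by omega
  rw [hin]
  have hbody :
      (List.range (K - 1)).foldl
        (fun (p : Int × Int) (s : Nat) =>
          let a := PySem.List.pyGetD arr (0 + (t : Int) + (1 + (s : Int))) 0
          (if a > p.1 then a else p.1, if a < p.2 then a else p.2))
        (PySem.List.pyGetD arr (0 + (t : Int)) 0, PySem.List.pyGetD arr (0 + (t : Int)) 0)
      = (wF max arr t (K - 1), wF min arr t (K - 1)) := by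
    rw [← innerA arr t (K - 1)]
    have hseed : PySem.List.pyGetD arr (0 + (t : Int)) 0 = arr.getD t 0 := by
      rw [zero_add, PySem.List.pyGetD_natCast]
    rw [hseed]
    apply PySem.List.foldl_congr_mem
    intro p s _
    have hx : (0 + (t : Int) + (1 + (s : Int))) = ((t + 1 + s : Nat) : Int) := by push_cast; ring
    simp only [hx, PySem.List.pyGetD_natCast]
    rw [if_gt_eq_max, if_lt_eq_min]
  rw [hbody]

theorem B_eq (arr : List Int) (K : Nat) (hK : 1 ≤ K) :
    MaxDiffWindow_alt arr (K : Int) = specLoop arr K := by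
  simp only [MaxDiffWindow_alt, specLoop]
  rw [PySem.List.pyRange_one 0 (arr.length : Int), List.foldl_map]
  have hn0 : ((arr.length : Int) - 0).toNat = arr.length := by omega
  rw [hn0, buildP arr K arr.length]
  rw [PySem.List.pyRange_neg_one ((arr.length : Int) - 1) (-1), List.foldl_map]
  have hn1 : ((arr.length : Int) - 1 - (-1)).toNat = arr.length := by omega
  rw [hn1]
  have hstep : (List.range arr.length).foldl
      (fun (st : List Int × List Int) (t : Nat) =>
        pvSStep (arr.length : Int) (K : Int) arr st ((arr.length : Int) - 1 - (t : Int))) ([], [])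
      = ((List.range arr.length).map (fun t => sS max arr K (arr.length - 1 - t)),
         (List.range arr.length).map (fun t => sS min arr K (arr.length - 1 - t))) :=
    buildS arr K hK arr.length le_rfl
  rw [hstep]
  simp only [rev_map_range]
  rw [PySem.List.pyRange_one 0 ((arr.length : Int) - (K : Int) + 1), List.foldl_map]
  have hout : ((arr.length : Int) - (K : Int) + 1 - 0).toNat = arr.length + 1 - K := by omega
  rw [hout]
  apply PySem.List.foldl_congr_mem
  intro best t hmem
  have htb : t < arr.length + 1 - K := List.mem_range.mp hmem
  have htK : t + K ≤ arr.length := by omega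
  have htn : t < arr.length := by omega
  have hx0 : (0 + (t : Int)) = ((t : Nat) : Int) := by omega
  have hx1 : ((t : Int) + (K : Int) - 1) = ((t + K - 1 : Nat) : Int) := by omega
  rw [hx0, hx1]
  simp only [PySem.List.pyGetD_natCast]
  rw [PySem.List.getD_map_range _ _ _ _ htn, PySem.List.getD_map_range _ _ _ _ htn,
    PySem.List.getD_map_range _ _ _ _ (by omega : t + K - 1 < arr.length),
    PySem.List.getD_map_range _ _ _ _ (by omega : t + K - 1 < arr.length)]
  rw [if_gt_eq_max]
  rw [windowEq max max_assoc max_self arr K t hK htK,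
    windowEq min min_assoc min_self arr K t hK htK]

-- ===== VERDICT (by name: the statement is the Claim_ definition above) =====
theorem MaxDiffWindow_spec : Claim_equal_MaxDiffWindow := by
  intro arr k _ hpre
  unfold Pre_MaxDiffWindow at hpre
  have hk : ((k.toNat : Int)) = k := Int.toNat_of_nonneg (by omega)
  have hK : 1 ≤ k.toNat := by omega
  unfold Spec_MaxDiffWindow
  rw [← hk, A_eq, B_eq arr k.toNat hK]
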